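-- pv_equiv track=rewrite | github.com/mogab12/Projeto-Integrado-7 | Trajetória/Antlr4/interface.py | ascii_hex_encode
-- ===== SOURCE A (Python) =====
-- def ascii_hex_encode(texto):
--     result = []
--     for c in texto:
--         byte_val = ord(c)
--         high_nibble = (byte_val >> 4) & 0x0F
--         low_nibble = byte_val & 0x0F
--         result.append(ord("0123456789ABCDEF"[high_nibble]))
--         result.append(ord("0123456789ABCDEF"[low_nibble]))
--     return result
-- ===== SOURCE B (Python) =====
-- def ascii_hex_encode(texto):
--     raw = bytes(ord(c) & 0xFF for c in texto)
--     hexstr = raw.hex().upper()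
--     return [ord(ch) for ch in hexstr]
-- ===== Notes on version B (the rewrite author's own statement) =====
-- stated objective: idiomatic
-- what changed: Replaces inline per-character nibble shifting and table lookups with a build-then-encode pipeline: construct the masked byte buffer, hex-encode it in one library call (bytes.hex().upper()), then map ord over the digits.
import Mathlib
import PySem

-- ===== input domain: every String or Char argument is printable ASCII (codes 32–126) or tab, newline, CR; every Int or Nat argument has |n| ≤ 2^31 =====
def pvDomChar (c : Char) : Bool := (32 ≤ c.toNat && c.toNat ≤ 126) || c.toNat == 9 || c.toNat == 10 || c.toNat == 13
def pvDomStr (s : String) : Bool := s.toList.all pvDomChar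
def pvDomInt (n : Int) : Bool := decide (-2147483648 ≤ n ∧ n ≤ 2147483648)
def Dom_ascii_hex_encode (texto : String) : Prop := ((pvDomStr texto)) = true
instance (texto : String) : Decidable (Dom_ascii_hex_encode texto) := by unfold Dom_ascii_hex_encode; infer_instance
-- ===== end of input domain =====

-- B builds the byte buffer first and hex-encodes it in one pass (bytes.hex().upper()) instead of
-- A's inline per-character nibble shifting; objective: more idiomatic, same cost.

-- ===== PORT A =====
-- A indexes the literal "0123456789ABCDEF"; the index is always (· &&& 0x0F) < 16, so the
-- getD default is never used (Python never raises here).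
def ascii_hex_encode (texto : String) : List Int :=
  texto.toList.foldl
    (fun result c =>
      let byte_val : Nat := c.toNat
      let high_nibble : Nat := (byte_val >>> 4) &&& 0x0F
      let low_nibble : Nat := byte_val &&& 0x0F
      result ++ [Int.ofNat ((['0','1','2','3','4','5','6','7','8','9','A','B','C','D','E','F'].getD high_nibble ' ').toNat),
                 Int.ofNat ((['0','1','2','3','4','5','6','7','8','9','A','B','C','D','E','F'].getD low_nibble ' ').toNat)])
    []

-- ===== PORT B =====
-- models one byte's two lowercase digits from bytes.hex()
def pvHexByte (b : Nat) : List Char :=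
  [['0','1','2','3','4','5','6','7','8','9','a','b','c','d','e','f'].getD (b / 16) ' ', ['0','1','2','3','4','5','6','7','8','9','a','b','c','d','e','f'].getD (b % 16) ' ']

def ascii_hex_encode_alt (texto : String) : List Int :=
  let raw : List Nat := texto.toList.map (fun c => c.toNat &&& 0xFF)   -- bytes(ord(c) & 0xFF …)
  let hexstr : String := PySem.Str.upper (String.ofList (raw.flatMap pvHexByte))  -- raw.hex().upper()
  hexstr.toList.map (fun ch => Int.ofNat ch.toNat)

-- ===== PRECONDITION & SPEC =====
def Spec_ascii_hex_encode (texto : String) (out : List Int) : Prop := out = ascii_hex_encode_alt texto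
instance (texto : String) (out : List Int) : Decidable (Spec_ascii_hex_encode texto out) := by unfold Spec_ascii_hex_encode; infer_instance

-- ===== CLAIM (what is proved, stated in full; the proofs are below) =====
def Claim_equal_ascii_hex_encode : Prop := ∀ (texto : String), Dom_ascii_hex_encode texto → Spec_ascii_hex_encode texto (ascii_hex_encode texto)

-- ===== LEMMAS AND PROOFS =====

-- per-digit agreement between A's uppercase table and upper-cased lowercase digits
theorem pv_digit (n : Nat) (h : n < 16) :
    Int.ofNat ((['0','1','2','3','4','5','6','7','8','9','A','B','C','D','E','F'].getD n ' ').toNat)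
    = Int.ofNat ((PySem.Chars.upperChar (['0','1','2','3','4','5','6','7','8','9','a','b','c','d','e','f'].getD n ' ')).toNat) := by
  interval_cases n <;> rfl

-- per-character agreement: A's two uppercase-table codes equal B's upper-cased lowercase digits
theorem pv_char_agree (c : Char) (h : c.toNat < 256) :
    [Int.ofNat ((['0','1','2','3','4','5','6','7','8','9','A','B','C','D','E','F'].getD ((c.toNat >>> 4) &&& 0x0F) ' ').toNat),
     Int.ofNat ((['0','1','2','3','4','5','6','7','8','9','A','B','C','D','E','F'].getD (c.toNat &&& 0x0F) ' ').toNat)]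
    = (pvHexByte (c.toNat &&& 0xFF)).map (fun ch => Int.ofNat (PySem.Chars.upperChar ch).toNat) := by
  have hmask : c.toNat &&& 0xFF = c.toNat := by
    rw [show (0xFF : Nat) = 2 ^ 8 - 1 by norm_num, Nat.and_two_pow_sub_one_eq_mod]
    exact Nat.mod_eq_of_lt h
  have hshift : c.toNat >>> 4 = c.toNat / 16 := Nat.shiftRight_eq_div_pow c.toNat 4
  have hand15 : ∀ n : Nat, n &&& 0x0F = n % 16 := fun n => Nat.and_two_pow_sub_one_eq_mod n 4
  rw [hmask, hshift, hand15, hand15]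
  have hhi : c.toNat / 16 < 16 := by omega
  have hlo : c.toNat % 16 < 16 := Nat.mod_lt _ (by norm_num)
  unfold pvHexByte
  simp only [List.map_cons, List.map_nil]
  rw [Nat.mod_eq_of_lt hhi, pv_digit _ hhi, pv_digit _ hlo]

theorem pv_chars_lt (texto : String) (hd : Dom_ascii_hex_encode texto) :
    ∀ c ∈ texto.toList, c.toNat < 256 := by
  intro c hc
  have := List.all_eq_true.mp hd c hc
  unfold pvDomChar at this
  simp only [Bool.or_eq_true, Bool.and_eq_true, decide_eq_true_eq, beq_iff_eq] at this
  omega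

theorem pv_list_agree (l : List Char) (h : ∀ c ∈ l, c.toNat < 256) :
    l.flatMap (fun c =>
      [Int.ofNat ((['0','1','2','3','4','5','6','7','8','9','A','B','C','D','E','F'].getD ((c.toNat >>> 4) &&& 0x0F) ' ').toNat),
       Int.ofNat ((['0','1','2','3','4','5','6','7','8','9','A','B','C','D','E','F'].getD (c.toNat &&& 0x0F) ' ').toNat)])
    = ((l.map (fun c => c.toNat &&& 0xFF)).flatMap pvHexByte).map
        (fun ch => Int.ofNat (PySem.Chars.upperChar ch).toNat) := by
  induction l with
  | nil => rfl
  | cons c cs ih =>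
    simp only [List.flatMap_cons, List.map_cons, List.map_append]
    rw [ih (fun x hx => h x (List.mem_cons_of_mem _ hx)),
        pv_char_agree c (h c (List.mem_cons_self))]

-- ===== VERDICT (by name: the statement is the Claim_ definition above) =====
theorem ascii_hex_encode_spec : Claim_equal_ascii_hex_encode := by
  intro texto hd
  unfold Spec_ascii_hex_encode ascii_hex_encode ascii_hex_encode_alt
  dsimp only
  rw [PySem.List.foldl_append_eq_flatMap, List.nil_append, PySem.Str.toList_upper]
  simp only [PySem.Chars.upper, String.toList_ofList, List.map_map, Function.comp_def]
  exact pv_list_agree texto.toList (pv_chars_lt texto hd)
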